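-- pv_equiv track=rewrite | github.com/arisongha/algorithm | leetcode/Medium/CamelcaseMatching/CamelcaseMatching.py | camelMatch
-- ===== SOURCE A (Python) =====
-- def camelMatch(queries: 'List[str]', pattern: str) -> 'List[bool]':
--
--     result = []
--     for querie in queries:
--         camel = ""
--         for i,v in enumerate(querie):
--             if v.isupper():
--                 camel += v
--
--         result.append(camel)
--
--     returnBool = []
--     for camel in result:
--         if camel == pattern:
--             returnBool.append(True)
--         else:
--             returnBool.append(False)
--
--     return returnBool
-- ===== SOURCE B (Python) =====
-- def camelMatch(queries: 'List[str]', pattern: str) -> 'List[bool]':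
--     result = []
--     for q in queries:
--         j = 0
--         ok = True
--         for c in q:
--             if c.isupper():
--                 if j < len(pattern) and c == pattern[j]:
--                     j += 1
--                 else:
--                     ok = False
--                     break
--         result.append(ok and j == len(pattern))
--     return result
-- ===== Notes on version B (the rewrite author's own statement) =====
-- stated objective: alternative
-- what changed: Single pass per query with a two-pointer index into pattern and early exit, instead of first building the uppercase-filtered string and then comparing it to pattern in a second loop.
import Mathlib
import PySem

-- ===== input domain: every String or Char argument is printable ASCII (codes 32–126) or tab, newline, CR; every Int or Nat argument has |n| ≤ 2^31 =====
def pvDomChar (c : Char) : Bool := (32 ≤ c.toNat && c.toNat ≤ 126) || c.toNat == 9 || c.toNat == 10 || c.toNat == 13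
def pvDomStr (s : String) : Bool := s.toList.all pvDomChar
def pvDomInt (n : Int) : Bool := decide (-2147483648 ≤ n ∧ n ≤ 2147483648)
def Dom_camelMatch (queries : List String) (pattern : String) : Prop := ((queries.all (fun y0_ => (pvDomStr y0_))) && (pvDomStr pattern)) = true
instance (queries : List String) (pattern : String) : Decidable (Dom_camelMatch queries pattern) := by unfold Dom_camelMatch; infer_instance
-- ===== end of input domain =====

-- B replaces A's build-the-uppercase-string-then-compare two-loop scheme with a single
-- pass per query using a two-pointer index into pattern and early exit (alternative decomposition).

-- ===== PORT A =====
-- inner loop: camel += v for each uppercase v (enumerate index unused, as in A)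
def camelMatchCamel (querie : String) : List Char :=
  (PySem.List.enumerate querie.toList 0).foldl
    (fun camel iv => if PySem.Chars.isupper iv.2 then camel ++ [iv.2] else camel) []

def camelMatch (queries : List String) (pattern : String) : List Bool :=
  let result := queries.foldl (fun result querie => result ++ [camelMatchCamel querie]) []
  result.foldl (fun returnBool camel =>
    if camel == pattern.toList then returnBool ++ [true] else returnBool ++ [false]) []

-- ===== PORT B =====
-- the inner for-loop of B: j = pattern index, early "break" by returning false
def camelMatchScan (ps : List Char) : List Char → Nat → Bool
  | [], j => j == ps.length
  | c :: cs, j =>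
    if PySem.Chars.isupper c then
      if j < ps.length && (ps[j]? == some c) then camelMatchScan ps cs (j + 1)
      else false
    else camelMatchScan ps cs j

def camelMatch_alt (queries : List String) (pattern : String) : List Bool :=
  queries.map (fun q => camelMatchScan pattern.toList q.toList 0)

-- ===== PRECONDITION & SPEC =====
def Spec_camelMatch (queries : List String) (pattern : String) (out : List Bool) : Prop := out = camelMatch_alt queries pattern
instance (queries : List String) (pattern : String) (out : List Bool) : Decidable (Spec_camelMatch queries pattern out) := by unfold Spec_camelMatch; infer_instance

-- ===== CLAIM (what is proved, stated in full; the proofs are below) =====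
def Claim_equal_camelMatch : Prop := ∀ (queries : List String) (pattern : String), Dom_camelMatch queries pattern → Spec_camelMatch queries pattern (camelMatch queries pattern)

-- ===== LEMMAS AND PROOFS =====

-- A's inner loop computes the uppercase filter of the query
theorem camelMatchCamel_eq_filter (q : String) :
    camelMatchCamel q = q.toList.filter PySem.Chars.isupper := by
  unfold camelMatchCamel
  suffices h : ∀ (xs : List Char) (s : Int) (acc : List Char),
      (PySem.List.enumerate xs s).foldl
        (fun camel iv => if PySem.Chars.isupper iv.2 then camel ++ [iv.2] else camel) acc
      = acc ++ xs.filter PySem.Chars.isupper by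
    simpa using h q.toList 0 []
  intro xs
  induction xs with
  | nil => intro s acc; simp [PySem.List.enumerate_nil]
  | cons x xs ih =>
    intro s acc
    simp only [PySem.List.enumerate_cons, List.foldl_cons, List.filter_cons]
    by_cases hx : PySem.Chars.isupper x = true
    · simp [hx, ih]
    · simp [hx, ih]

-- B's scan decides whether the uppercase filter equals the remaining pattern
theorem beq_eq_decide_list (a b : List Char) : (a == b) = decide (a = b) := by
  by_cases h : a = b <;> simp [h]

theorem camelMatchScan_eq (ps : List Char) (cs : List Char) :
    ∀ j : Nat, j ≤ ps.length →
      camelMatchScan ps cs j = decide (cs.filter PySem.Chars.isupper = ps.drop j) := by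
  induction cs with
  | nil =>
    intro j hle
    simp only [camelMatchScan, List.filter_nil]
    by_cases hj : j = ps.length
    · simp [hj, List.drop_length]
    · have hlt : j < ps.length := lt_of_le_of_ne hle hj
      have hne : ps.drop j ≠ [] := by
        intro h0
        have := List.drop_eq_nil_iff.mp h0
        omega
      have h2 : ¬ ([] = ps.drop j) := fun h0 => hne h0.symm
      simp [hj, h2]
  | cons c cs ih =>
    intro j hle
    simp only [camelMatchScan, List.filter_cons]
    by_cases hc : PySem.Chars.isupper c = true
    · simp only [hc, if_true]
      rcases Nat.lt_or_ge j ps.length with h | h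
      · have hdrop : ps.drop j = ps[j] :: ps.drop (j + 1) := List.drop_eq_getElem_cons h
        by_cases he : ps[j] = c
        · rw [if_pos (by simp [h, he]), ih (j + 1) h]
          simp [hdrop, he]
        · rw [if_neg (by simp [List.getElem?_eq_getElem h, he])]
          have hne : ¬ (c :: List.filter PySem.Chars.isupper cs = ps.drop j) := by
            rw [hdrop]
            intro h0
            exact he (by injection h0 with h1 _; exact h1.symm)
          simp [hne]
      · have hj : j = ps.length := le_antisymm hle h
        have hdrop : ps.drop j = [] := by simp [hj, List.drop_length]
        rw [if_neg (by simp; omega)]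
        simp [hdrop]
    · simp only [hc]
      rw [ih j hle]
      simp

-- A's second loop is a map over the list of camels
theorem foldl_bool_map (ps : List Char) (l : List (List Char)) (acc : List Bool) :
    l.foldl (fun returnBool camel =>
      if camel == ps then returnBool ++ [true] else returnBool ++ [false]) acc
    = acc ++ l.map (fun camel => camel == ps) := by
  induction l generalizing acc with
  | nil => simp
  | cons x xs ih =>
    rw [List.foldl_cons, List.map_cons]
    by_cases hx : (x == ps) = true
    · rw [if_pos hx, ih, hx]; simp
    · have hf : (x == ps) = false := by simpa using hx
      rw [if_neg hx, ih, hf]; simp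

theorem foldl_append_id (l : List String) (acc : List (List Char)) :
    l.foldl (fun r q => r ++ [camelMatchCamel q]) acc = acc ++ l.map camelMatchCamel := by
  induction l generalizing acc with
  | nil => simp
  | cons x xs ih => simp [ih]

-- ===== VERDICT (by name: the statement is the Claim_ definition above) =====
theorem camelMatch_spec : Claim_equal_camelMatch := by
  intro queries pattern _
  unfold Spec_camelMatch camelMatch camelMatch_alt
  simp only [foldl_append_id, List.nil_append, foldl_bool_map, List.map_map]
  apply List.map_congr_left
  intro q _
  simp only [Function.comp_apply]
  rw [camelMatchCamel_eq_filter, beq_eq_decide_list,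
    camelMatchScan_eq pattern.toList q.toList 0 (Nat.zero_le _), List.drop_zero]
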